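-- pv_equiv track=rewrite | github.com/PeshX/DARP_Project | solver/genAlgo.py | PathTransferPassenger
-- ===== SOURCE A (Python) =====
-- def PathTransferPassenger(overall_path):
--
--     """
--     Computes the transfer path and the passengers' paths for the fitness computation
--
--     @param overall_path: general path given by the RoutingAlgorithm method
--
--     @return: one list fro the transfer's path and a list of lists fro the partial paths of the passengers
--     """
--
--     # Find the indices of 'SOP' and 'EOP' in the list
--     sop_indices = [index for index, value in enumerate(overall_path) if value == 'SOP']
--     eop_indices = [index for index, value in enumerate(overall_path) if value == 'EOP']
--
--     # Segments the list based on 'SOP' and 'EOP' indices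
--     segmented_list = [overall_path[sop_indices[i]+1:eop_indices[i]] for i in range(len(eop_indices))]
--
--     # Passenger path below
--
--     filtered_segmentation = []
--
--     for su_list in (segmented_list):
--         filtered_segmentation.extend([[elem for elem in (su_list) if (elem!='SOP' and elem!='EOP')]])
--
--
--     true_filtered_segmentation=[]
--     for su_list in (filtered_segmentation):
--
--         result=[su_list[0]]
--         for i in range(1, len(su_list)):
--                 if su_list[i] != su_list[i - 1]:
--                     result.append(su_list[i])
--
--         true_filtered_segmentation.extend([result])
--
--     # Transfer path below
--
--     # Indexes of EOP
--     k = [value for value in  range(len(overall_path)) if overall_path[value] =='EOP']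
--
--     k.extend([value2-1 for value2 in k])
--
--     # Indexes of SOP
--     j = [value for value in  range(len(overall_path)) if overall_path[value] =='SOP']
--     k.extend(j)
--     transfer_path = [elem for i, elem in enumerate(overall_path) if i not in k]
--
--
--     return transfer_path, true_filtered_segmentation
-- ===== SOURCE B (Python) =====
-- def PathTransferPassenger(overall_path):
--     """Single streaming pass (state machine with SOP/EOP counters, a dict of
--     active segments and a one-element delay line) instead of A's staged
--     index-list/slice/exclusion-set construction.  Where A raises IndexError
--     (unmatched EOP or a segment with no non-marker element) B returns the
--     naturally corresponding value instead (outside Pre_)."""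
--     segs = {}
--     s = 0
--     e = 0
--     transfer_path = []
--     pending = None
--     for x in overall_path:
--         if x == 'EOP':
--             e += 1
--             pending = None
--         elif x == 'SOP':
--             if pending is not None:
--                 transfer_path.append(pending)
--             pending = None
--             s += 1
--         else:
--             if pending is not None:
--                 transfer_path.append(pending)
--             pending = x
--             for i in range(e, s):
--                 seg = segs.setdefault(i, [])
--                 if not seg or seg[-1] != x:
--                     seg.append(x)
--     if pending is not None:
--         transfer_path.append(pending)
--     return transfer_path, [segs.get(i, []) for i in range(e)]
-- ===== Notes on version B (the rewrite author's own statement) =====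
-- stated objective: alternative
-- what changed: B is a single streaming state machine over the path: it never builds SOP/EOP index lists, slices, or an index-exclusion set; instead it carries occurrence counters s/e, a dict of active segments (an element joins segment i when e<=i<s, deduped against the segment's last element as it is appended), and a one-element delay line whose pending element is flushed to the transfer path unless the next element is 'EOP'.
import Mathlib
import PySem

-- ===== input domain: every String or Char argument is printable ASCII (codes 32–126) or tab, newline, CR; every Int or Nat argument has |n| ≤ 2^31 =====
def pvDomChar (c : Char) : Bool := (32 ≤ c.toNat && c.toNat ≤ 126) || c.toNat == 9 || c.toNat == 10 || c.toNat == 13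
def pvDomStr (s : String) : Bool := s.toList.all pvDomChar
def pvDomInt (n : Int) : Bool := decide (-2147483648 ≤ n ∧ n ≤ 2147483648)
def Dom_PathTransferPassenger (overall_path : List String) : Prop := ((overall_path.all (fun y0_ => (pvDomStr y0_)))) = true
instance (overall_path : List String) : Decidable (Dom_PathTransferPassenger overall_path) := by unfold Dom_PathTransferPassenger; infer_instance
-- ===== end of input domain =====

-- B replaces A's staged construction (SOP/EOP index lists, slices, an index-exclusion
-- set tested with 'i not in k') by a single streaming state machine: occurrence
-- counters, a dict of active segments with inline consecutive dedup, and a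
-- one-element delay line for the transfer path (objective: alternative).

-- ===== PORT A =====
def PathTransferPassenger (overall_path : List String) : List String × List (List String) :=
  let sop_indices : List Int := ((PySem.List.enumerate overall_path).filter (fun q => q.2 == "SOP")).map (·.1)
  let eop_indices : List Int := ((PySem.List.enumerate overall_path).filter (fun q => q.2 == "EOP")).map (·.1)
  -- overall_path[sop_indices[i]+1:eop_indices[i]]: sop_indices[i] raises IndexError when
  -- len(eop)>len(sop); excluded by Pre_, ported with default 0
  let segmented_list : List (List String) :=
    (PySem.List.pyRange 0 (PySem.List.len eop_indices) 1).map (fun i =>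
      PySem.List.slice overall_path (some (PySem.List.pyGetD sop_indices i 0 + 1)) (some (PySem.List.pyGetD eop_indices i 0)))
  let filtered_segmentation : List (List String) :=
    segmented_list.foldl (fun acc su_list => acc ++ [su_list.filter (fun elem => elem != "SOP" && elem != "EOP")]) []
  -- result = [su_list[0]]: raises IndexError on an empty su_list; excluded by Pre_, ported with default ""
  let true_filtered_segmentation : List (List String) :=
    filtered_segmentation.foldl (fun acc su_list =>
      acc ++ [(PySem.List.pyRange 1 (PySem.List.len su_list) 1).foldl (fun result i =>
          if PySem.List.pyGetD su_list i "" != PySem.List.pyGetD su_list (i - 1) "" then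
            result ++ [PySem.List.pyGetD su_list i ""] else result)
        [PySem.List.pyGetD su_list 0 ""]]) []
  let k0 : List Int := (PySem.List.pyRange 0 (PySem.List.len overall_path) 1).filter (fun v => PySem.List.pyGetD overall_path v "" == "EOP")
  let k1 : List Int := k0 ++ k0.map (fun v2 => v2 - 1)
  let j : List Int := (PySem.List.pyRange 0 (PySem.List.len overall_path) 1).filter (fun v => PySem.List.pyGetD overall_path v "" == "SOP")
  let k : List Int := k1 ++ j
  let transfer_path : List String := ((PySem.List.enumerate overall_path).filter (fun q => !(k.contains q.1))).map (·.2)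
  (transfer_path, true_filtered_segmentation)

-- ===== PORT B =====
-- B-side helper: 'seg.append(x)' guarded by the consecutive-dedup test
def pvDD (seg : List String) (x : String) : List String :=
  if seg.isEmpty || seg.getLast? != some x then seg ++ [x] else seg

-- B-side helper: the body of B's single loop; state = (transfer_path, pending, s, e, segs)
def pvBStep (st : List String × Option String × Int × Int × PySem.Dict Int (List String)) (x : String) :
    List String × Option String × Int × Int × PySem.Dict Int (List String) :=
  match st with
  | (tp, pend, s, e, segs) =>
    if x == "EOP" then (tp, none, s, e + 1, segs)
    else if x == "SOP" then (tp ++ pend.toList, none, s + 1, e, segs)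
    else (tp ++ pend.toList, some x, s, e,
      (PySem.List.pyRange e s 1).foldl (fun d i => d.modify i [] (fun seg => pvDD seg x)) segs)

def PathTransferPassenger_alt (overall_path : List String) : List String × List (List String) :=
  let st := overall_path.foldl pvBStep ([], none, 0, 0, PySem.Dict.empty)
  (st.1 ++ st.2.1.toList,
   (PySem.List.pyRange 0 st.2.2.2.1 1).map (fun i => st.2.2.2.2.getD i []))

-- ===== PRECONDITION & SPEC =====
-- helpers for Pre_ only: the positions of 'SOP' / 'EOP' in the input
def pvSops (overall_path : List String) : List Int := ((PySem.List.enumerate overall_path).filter (fun q => q.2 == "SOP")).map (·.1)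
def pvEops (overall_path : List String) : List Int := ((PySem.List.enumerate overall_path).filter (fun q => q.2 == "EOP")).map (·.1)

-- Pre_ is exactly where the Python A returns: each 'EOP' has a positionally matching
-- 'SOP' (else sop_indices[i] raises IndexError) and each segment between the i-th 'SOP'
-- and the i-th 'EOP' keeps at least one non-marker element (else result=[su_list[0]]
-- raises IndexError on the empty filtered segment).
def Pre_PathTransferPassenger (overall_path : List String) : Prop :=
  (pvEops overall_path).length ≤ (pvSops overall_path).length ∧
  ∀ i ∈ List.range (pvEops overall_path).length,
    ∃ x ∈ PySem.List.slice overall_path (some ((pvSops overall_path).getD i 0 + 1)) (some ((pvEops overall_path).getD i 0)),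
      x ≠ "SOP" ∧ x ≠ "EOP"
instance (overall_path : List String) : Decidable (Pre_PathTransferPassenger overall_path) := by unfold Pre_PathTransferPassenger; infer_instance

def pvWitness_PathTransferPassenger : List String := ["d1", "SOP", "a", "a", "b", "EOP", "d2", "SOP", "c", "EOP", "d3"]

def Spec_PathTransferPassenger (overall_path : List String) (out : List String × List (List String)) : Prop := out = PathTransferPassenger_alt overall_path
instance (overall_path : List String) (out : List String × List (List String)) : Decidable (Spec_PathTransferPassenger overall_path out) := by unfold Spec_PathTransferPassenger; infer_instance

-- ===== CLAIM (what is proved, stated in full; the proofs are below) =====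
def Claim_equal_PathTransferPassenger : Prop := ∀ (overall_path : List String), Dom_PathTransferPassenger overall_path → Pre_PathTransferPassenger overall_path → Spec_PathTransferPassenger overall_path (PathTransferPassenger overall_path)

-- ===== LEMMAS AND PROOFS =====

-- ---- common abbreviations (proof-only) ----

def pvNM (x : String) : Bool := x != "SOP" && x != "EOP"

-- the normal form every list below is reduced to: the elements of p at the positions
-- (in order) satisfying a predicate
def pvN (p : List String) (pred : Nat → Bool) : List String :=
  ((List.range p.length).filter pred).map (fun m => p.getD m "")

-- number of occurrences of v among the first m elements of p
def pvCnt (v : String) (p : List String) (m : Nat) : Nat :=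
  ((List.range m).filter (fun q => p.getD q "" == v)).length

-- positions of v in p
def pvPos (v : String) (p : List String) : List Nat :=
  (List.range p.length).filter (fun q => p.getD q "" == v)

def pvToInt (l : List Nat) : List Int := l.map (fun m : Nat => (m : Int))

theorem pvToInt_length (l : List Nat) : (pvToInt l).length = l.length := by
  simp [pvToInt]

theorem pvToInt_getD (l : List Nat) (j : Nat) (h : j < l.length) :
    (pvToInt l).getD j 0 = (l[j] : Int) := by
  unfold pvToInt
  rw [List.getD_eq_getElem _ 0 (by simpa using h)]
  simp

-- ---- generic position lemmas ----

theorem pvN_congr (p : List String) (pred1 pred2 : Nat → Bool)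
    (h : ∀ m, m < p.length → pred1 m = pred2 m) : pvN p pred1 = pvN p pred2 := by
  unfold pvN
  congr 1
  exact List.filter_congr (fun m hm => h m (List.mem_range.mp hm))

theorem pvN_filter (p : List String) (pred : Nat → Bool) (b : String → Bool) :
    (pvN p pred).filter b = pvN p (fun m => pred m && b (p.getD m "")) := by
  unfold pvN
  rw [List.filter_map, ← List.filter_filter]
  congr 1
  rw [List.filter_comm]
  rfl

theorem pvN_cons (x : String) (t : List String) (pred : Nat → Bool) :
    pvN (x :: t) pred = (if pred 0 then [x] else []) ++ pvN t (fun m => pred (m + 1)) := by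
  simp only [pvN, List.length_cons, List.range_succ_eq_map, List.filter_cons, List.filter_map]
  by_cases h : pred 0 <;>
    simp [h, Function.comp_def, Nat.succ_eq_add_one]

theorem pvCnt_cons (v x : String) (t : List String) (m : Nat) :
    pvCnt v (x :: t) (m + 1) = (if x == v then 1 else 0) + pvCnt v t m := by
  simp only [pvCnt, List.range_succ_eq_map, List.filter_cons, List.filter_map]
  by_cases h : x == v <;>
    simp [h, Function.comp_def, Nat.succ_eq_add_one, Nat.add_comm]

theorem pvCnt_zero (v : String) (p : List String) : pvCnt v p 0 = 0 := rfl

theorem pvCnt_full (v : String) (p : List String) : pvCnt v p p.length = p.count v := by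
  induction p with
  | nil => rfl
  | cons x t ih =>
    rw [List.length_cons, pvCnt_cons, ih, List.count_cons]
    by_cases h : x == v <;> simp [h] <;> omega

-- i-th smallest position vs prefix count, for a strictly increasing list
theorem pv_nth_lt_iff {L : List Nat} (hL : L.Pairwise (· < ·)) {i : Nat} (hi : i < L.length) (m : Nat) :
    L[i] < m ↔ i < (L.filter (fun q => q < m)).length := by
  induction L generalizing i with
  | nil => simp at hi
  | cons a t ih =>
    have hat : ∀ y ∈ t, a < y := (List.pairwise_cons.mp hL).1
    by_cases ham : a < m
    · have : (a :: t).filter (fun q => decide (q < m)) = a :: t.filter (fun q => decide (q < m)) := by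
        simp [List.filter_cons, ham]
      rw [this]
      cases i with
      | zero => simpa using ham
      | succ j =>
        have hj : j < t.length := by simpa using hi
        simpa using ih (List.pairwise_cons.mp hL).2 hj
    · have hnone : ∀ y ∈ a :: t, ¬ y < m := by
        intro y hy
        rcases List.mem_cons.mp hy with rfl | hy'
        · exact ham
        · exact fun hlt => ham (lt_trans (hat y hy') hlt |> lt_of_le_of_lt (le_refl a) |> id) 
      have : (a :: t).filter (fun q => decide (q < m)) = [] := by
        rw [List.filter_eq_nil_iff]
        intro y hy
        simpa using hnone y hy
      rw [this]
      constructor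
      · intro hlt
        exact absurd hlt (hnone _ (List.getElem_mem hi))
      · intro h; simp at h
  

theorem pvPos_pairwise (v : String) (p : List String) : (pvPos v p).Pairwise (· < ·) := by
  unfold pvPos
  exact List.Pairwise.sublist List.filter_sublist List.pairwise_lt_range

theorem pvPos_filter_lt (v : String) (p : List String) (m : Nat) (hm : m ≤ p.length) :
    (pvPos v p).filter (fun q => q < m) = (List.range m).filter (fun q => p.getD q "" == v) := by
  unfold pvPos
  rw [List.filter_filter]
  have hsplit : List.range p.length = List.range m ++ (List.range (p.length - m)).map (m + ·) := by
    rw [← List.range_add]; congr 1; omega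
  rw [hsplit, List.filter_append]
  have h1 : (List.range m).filter (fun a => decide (a < m) && p.getD a "" == v)
      = (List.range m).filter (fun q => p.getD q "" == v) := by
    apply List.filter_congr
    intro q hq
    simp [List.mem_range.mp hq]
  have h2 : ((List.range (p.length - m)).map (fun x => m + x)).filter
      (fun a => decide (a < m) && p.getD a "" == v) = [] := by
    rw [List.filter_eq_nil_iff]
    intro q hq
    obtain ⟨j, _, rfl⟩ := List.mem_map.mp hq
    simp
  rw [h1, h2, List.append_nil]

theorem pvPos_length (v : String) (p : List String) : (pvPos v p).length = p.count v := by
  exact pvCnt_full v p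

theorem pvPos_getElem_val (v : String) (p : List String) {i : Nat} (hi : i < (pvPos v p).length) :
    (pvPos v p)[i] < p.length ∧ p.getD (pvPos v p)[i] "" = v := by
  have hmem := List.getElem_mem hi
  unfold pvPos at hmem
  rw [List.mem_filter] at hmem
  exact ⟨List.mem_range.mp hmem.1, by simpa using hmem.2⟩

-- enumerate-filter-map index lists are the (casts of) position lists
theorem pv_enum_pos (v : String) (p : List String) :
    ((PySem.List.enumerate p).filter (fun q => q.2 == v)).map (·.1) = pvToInt (pvPos v p) := by
  rw [PySem.List.enumerate_eq_map_pyRange p "", PySem.List.pyRange_one, List.map_map,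
    List.filter_map, List.map_map]
  unfold pvPos
  have hn : ((PySem.List.len p) - 0).toNat = p.length := by simp [PySem.List.len_eq]
  rw [hn]
  have hpred : ∀ m ∈ List.range p.length,
      (((fun (q : Int × String) => q.2 == v) ∘ (fun j => (j, PySem.List.pyGetD p j "")) ∘ fun k : Nat => 0 + (k : Int)) m)
        = (p.getD m "" == v) := by
    intro m hm
    simp [Function.comp]
  unfold pvToInt
  rw [List.filter_congr hpred]
  simp [Function.comp_def]

theorem pv_range_filter_interval (n u v : Nat) :
    (List.range n).filter (fun m => decide (u ≤ m) && decide (m < v)) = List.range' u (min v n - u) := by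
  induction n with
  | zero => simp
  | succ n ih =>
    rw [List.range_succ, List.filter_append, ih]
    by_cases hv : n < v
    · by_cases hu : u ≤ n
      · have h1 : List.filter (fun m => decide (u ≤ m) && decide (m < v)) [n] = [n] := by simp [hu, hv]
        have h2 : min v (n + 1) - u = (min v n - u) + 1 := by omega
        have h3 : List.range' u (min v n - u + 1) = List.range' u (min v n - u) ++ [u + (min v n - u)] := by
          have := List.range'_concat (s := u) (n := min v n - u) (step := 1)
          simpa using this
        rw [h1, h2, h3]
        congr 2
        omega
      · have h1 : List.filter (fun m => decide (u ≤ m) && decide (m < v)) [n] = [] := by simp [hu]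
        have h2 : min v (n + 1) - u = min v n - u := by omega
        rw [h1, h2, List.append_nil]
    · have h1 : List.filter (fun m => decide (u ≤ m) && decide (m < v)) [n] = [] := by simp [hv]
      have h2 : min v (n + 1) - u = min v n - u := by omega
      rw [h1, h2, List.append_nil]

-- a nonneg-bounds slice in normal form
theorem pv_slice_N (p : List String) (u v : Nat) :
    PySem.List.slice p (some (u : Int)) (some (v : Int)) =
      pvN p (fun m => decide (u ≤ m) && decide (m < v)) := by
  rw [PySem.List.slice_natCast]
  unfold pvN
  rw [pv_range_filter_interval]
  apply List.ext_getElem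
  · simp [List.length_take, List.length_drop, List.length_range']
    omega
  · intro j h1 h2
    have hj : j < min v p.length - u := by simpa using h2
    have hju : u + j < p.length := by omega
    have hlhs : ((p.drop u).take (v - u))[j]'h1 = p[u + j]'hju := by
      simp [List.getElem_take, List.getElem_drop]
    rw [hlhs]
    rw [List.getElem_map]
    have : (List.range' u (min v p.length - u))[j]'(by simpa using hj) = u + j := by
      simp [List.getElem_range']
    rw [this, List.getD_eq_getElem p "" hju]

-- ---- the transfer path ----

-- what B's delay line ultimately appends, as a recursion over the remaining input
def pvG (pend : Option String) (t : List String) : List String :=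
  match t with
  | [] => pend.toList
  | x :: t' => if x == "EOP" then pvG none t'
               else if x == "SOP" then pend.toList ++ pvG none t'
               else pend.toList ++ pvG (some x) t'

theorem pvG_some (t : List String) (y : String) :
    pvG (some y) t = (if t.head? == some "EOP" then [] else [y]) ++ pvG none t := by
  cases t with
  | nil => simp [pvG]
  | cons x t' =>
    by_cases h1 : x = "EOP"
    · simp [pvG, h1]
    · by_cases h2 : x = "SOP" <;> simp [pvG, h1, h2]

theorem pvB_transfer (t : List String) : ∀ (tp : List String) (pend : Option String) (s e : Int)
    (segs : PySem.Dict Int (List String)),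
    (t.foldl pvBStep (tp, pend, s, e, segs)).1 ++ ((t.foldl pvBStep (tp, pend, s, e, segs)).2.1).toList
      = tp ++ pvG pend t := by
  intro tp pend s e segs
  induction t generalizing tp pend s e segs with
  | nil => simp [pvG]
  | cons x t' ih =>
    rw [show ((x :: t').foldl pvBStep (tp, pend, s, e, segs)
        = t'.foldl pvBStep (pvBStep (tp, pend, s, e, segs) x)) from List.foldl_cons ..]
    by_cases h1 : x = "EOP"
    · have hstep : pvBStep (tp, pend, s, e, segs) x = (tp, none, s, e + 1, segs) := by
        simp [pvBStep, h1]
      rw [hstep, ih]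
      simp [pvG, h1]
    · by_cases h2 : x = "SOP"
      · have hstep : pvBStep (tp, pend, s, e, segs) x = (tp ++ pend.toList, none, s + 1, e, segs) := by
          simp [pvBStep, h1, h2]
        rw [hstep, ih]
        simp [pvG, h1, h2, List.append_assoc]
      · have hstep : pvBStep (tp, pend, s, e, segs) x = (tp ++ pend.toList, some x, s, e,
            (PySem.List.pyRange e s 1).foldl (fun d i => d.modify i [] (fun seg => pvDD seg x)) segs) := by
          simp [pvBStep, h1, h2]
        rw [hstep, ih]
        simp [pvG, h1, h2, List.append_assoc]

theorem pvG_none_N (p : List String) :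
    pvG none p = pvN p (fun m => pvNM (p.getD m "") &&
      (decide (m + 1 = p.length) || p.getD (m + 1) "" != "EOP")) := by
  induction p with
  | nil => simp [pvG, pvN]
  | cons x t ih =>
    rw [pvN_cons]
    have htail : pvN t (fun m => pvNM ((x :: t).getD (m + 1) "") &&
        (decide (m + 1 + 1 = (x :: t).length) || (x :: t).getD (m + 1 + 1) "" != "EOP"))
        = pvN t (fun m => pvNM (t.getD m "") &&
        (decide (m + 1 = t.length) || t.getD (m + 1) "" != "EOP")) := by
      apply pvN_congr
      intro m hm
      simp [List.getD_cons_succ]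
    rw [htail, ← ih]
    by_cases h1 : x = "EOP"
    · simp [pvG, h1, pvNM]
    · by_cases h2 : x = "SOP"
      · simp [pvG, h2, pvNM]
      · have hL : pvG none (x :: t) = pvG (some x) t := by simp [pvG, h1, h2]
        rw [hL, pvG_some]
        cases t with
        | nil => simp [pvNM, h1, h2]
        | cons y t' =>
          by_cases hy : y = "EOP" <;>
            simp [pvNM, h1, h2, hy, List.getD_cons_succ, List.getD_cons_zero]

theorem pv_map_filter_congr {α β : Type} (l : List α) {P Q : α → Bool} {f g : α → β}
    (hPQ : ∀ a ∈ l, P a = Q a) (hfg : ∀ a ∈ l, f a = g a) :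
    (l.filter P).map f = (l.filter Q).map g := by
  rw [List.filter_congr hPQ]
  exact List.map_congr_left (fun a ha => hfg a (List.mem_filter.mp ha).1)

theorem pv_mem_idx (p : List String) (s : String) (v : Nat) :
    (v : Int) ∈ (PySem.List.pyRange 0 (PySem.List.len p) 1).filter (fun w => PySem.List.pyGetD p w "" == s)
    ↔ v < p.length ∧ p.getD v "" = s := by
  simp [List.mem_filter, PySem.List.mem_pyRange_one]

-- A's k-set membership at position n, as the local lookahead criterion
theorem pv_kset_raw (p : List String) (n : Nat) (hn : n < p.length) :
    (!(((PySem.List.pyRange 0 (PySem.List.len p) 1).filter (fun v => PySem.List.pyGetD p v "" == "EOP") ++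
        ((PySem.List.pyRange 0 (PySem.List.len p) 1).filter (fun v => PySem.List.pyGetD p v "" == "EOP")).map (fun v2 => v2 - 1) ++
        (PySem.List.pyRange 0 (PySem.List.len p) 1).filter (fun v => PySem.List.pyGetD p v "" == "SOP")).contains ((n : Nat) : Int)))
    = (p[n] != "SOP" && p[n] != "EOP" &&
       (((n : Nat) : Int) + 1 == PySem.List.len p || PySem.List.pyGetD p (((n : Nat) : Int) + 1) "" != "EOP")) := by
  rw [Bool.eq_iff_iff]
  simp only [Bool.not_eq_eq_eq_not, Bool.not_true, Bool.and_eq_true, Bool.or_eq_true,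
    bne_iff_ne, beq_iff_eq, List.contains_eq_mem, decide_eq_false_iff_not, List.mem_append,
    List.mem_map, pv_mem_idx]
  have hg : p.getD n "" = p[n] := List.getD_eq_getElem p "" hn
  have hex : (∃ a ∈ List.filter (fun v => PySem.List.pyGetD p v "" == "EOP") (PySem.List.pyRange 0 (PySem.List.len p)), a - 1 = (n : Int)) ↔ (n + 1 < p.length ∧ p.getD (n + 1) "" = "EOP") := by
    constructor
    · rintro ⟨a, ha, hEq⟩
      have haa : a = ((n + 1 : Nat) : Int) := by push_cast; omega
      rw [haa] at ha
      exact (pv_mem_idx p "EOP" (n + 1)).1 ha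
    · intro h
      exact ⟨((n + 1 : Nat) : Int), (pv_mem_idx p "EOP" (n + 1)).2 h, by push_cast; omega⟩
  rw [hex, hg]
  simp only [PySem.List.len_eq]
  by_cases hlt : n + 1 < p.length
  · have hpg : PySem.List.pyGetD p ((n : Int) + 1) "" = p.getD (n + 1) "" := by
      have hc : ((n : Int) + 1) = ((n + 1 : Nat) : Int) := by push_cast; ring
      rw [hc, PySem.List.pyGetD_natCast]
    have hne : ¬((n : Int) + 1 = (p.length : Int)) := by omega
    rw [hpg]
    have hg2 : p.getD (n + 1) "" = p[n + 1] := List.getD_eq_getElem p "" hlt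
    rw [hg2]
    tauto
  · have heq2 : n + 1 = p.length := by omega
    have hpg : PySem.List.pyGetD p ((n : Int) + 1) "" = "" := by
      have hc : ((n : Int) + 1) = ((n + 1 : Nat) : Int) := by push_cast; ring
      rw [hc, PySem.List.pyGetD_natCast]
      simp [List.getD, List.getElem?_eq_none (by omega : p.length ≤ n + 1)]
    have hT : ((n : Int) + 1 = (p.length : Int)) := by omega
    rw [hpg]
    tauto

theorem pv_kset (p : List String) (n : Nat) (hn : n < p.length) :
    (!(((PySem.List.pyRange 0 (PySem.List.len p) 1).filter (fun v => PySem.List.pyGetD p v "" == "EOP") ++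
        ((PySem.List.pyRange 0 (PySem.List.len p) 1).filter (fun v => PySem.List.pyGetD p v "" == "EOP")).map (fun v2 => v2 - 1) ++
        (PySem.List.pyRange 0 (PySem.List.len p) 1).filter (fun v => PySem.List.pyGetD p v "" == "SOP")).contains ((n : Nat) : Int)))
    = (pvNM (p.getD n "") &&
       (decide (n + 1 = p.length) || p.getD (n + 1) "" != "EOP")) := by
  rw [pv_kset_raw p n hn]
  rw [Bool.eq_iff_iff]
  have hg : p.getD n "" = p[n] := List.getD_eq_getElem p "" hn
  have hc : ((n : Int) + 1) = ((n + 1 : Nat) : Int) := by push_cast; ring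
  have hpg : PySem.List.pyGetD p ((n : Int) + 1) "" = p.getD (n + 1) "" := by
    rw [hc, PySem.List.pyGetD_natCast]
  have hcast : (((n : Int) + 1 = (p.length : Int)) ↔ n + 1 = p.length) := by omega
  simp only [pvNM, hg, hpg, PySem.List.len_eq, Bool.and_eq_true, Bool.or_eq_true, bne_iff_ne,
    beq_iff_eq, decide_eq_true_eq, ne_eq, hcast]

-- A's k-set test is the local lookahead criterion (positionwise)
theorem pvA_transfer_N (p : List String) :
    ((PySem.List.enumerate p).filter (fun q =>
      !((((PySem.List.pyRange 0 (PySem.List.len p) 1).filter (fun v => PySem.List.pyGetD p v "" == "EOP") ++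
          ((PySem.List.pyRange 0 (PySem.List.len p) 1).filter (fun v => PySem.List.pyGetD p v "" == "EOP")).map (fun v2 => v2 - 1) ++
          (PySem.List.pyRange 0 (PySem.List.len p) 1).filter (fun v => PySem.List.pyGetD p v "" == "SOP")).contains q.1)))).map (·.2)
      = pvN p (fun m => pvNM (p.getD m "") &&
          (decide (m + 1 = p.length) || p.getD (m + 1) "" != "EOP")) := by
  rw [PySem.List.enumerate_eq_map_pyRange p "", List.filter_map, List.map_map]
  have hbase : PySem.List.pyRange 0 (PySem.List.len p) 1 = (List.range p.length).map (fun k : Nat => (k : Int)) := by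
    rw [PySem.List.pyRange_one]
    simp [PySem.List.len_eq]
  rw [hbase, List.filter_map, List.map_map]
  unfold pvN
  apply pv_map_filter_congr
  · intro m hm
    have hmn : m < p.length := List.mem_range.mp hm
    have := pv_kset p m hmn
    rw [hbase] at this
    simpa [Function.comp] using this
  · intro m hm
    have hmn : m < p.length := List.mem_range.mp hm
    simp [Function.comp, List.getD_eq_getElem p "" hmn]

-- ---- the passenger segments ----

-- counters of B's fold
theorem pvB_counters (t : List String) : ∀ (tp : List String) (pend : Option String) (s e : Int)
    (segs : PySem.Dict Int (List String)),
    (t.foldl pvBStep (tp, pend, s, e, segs)).2.2.1 = s + (t.count "SOP" : Int) ∧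
    (t.foldl pvBStep (tp, pend, s, e, segs)).2.2.2.1 = e + (t.count "EOP" : Int) := by
  intro tp pend s e segs
  induction t generalizing tp pend s e segs with
  | nil => simp
  | cons x t' ih =>
    rw [show ((x :: t').foldl pvBStep (tp, pend, s, e, segs)
        = t'.foldl pvBStep (pvBStep (tp, pend, s, e, segs) x)) from List.foldl_cons ..]
    by_cases h1 : x = "EOP"
    · have hstep : pvBStep (tp, pend, s, e, segs) x = (tp, none, s, e + 1, segs) := by
        simp [pvBStep, h1]
      rw [hstep]
      obtain ⟨ih1, ih2⟩ := ih tp none s (e + 1) segs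
      refine ⟨?_, ?_⟩
      · rw [ih1]; simp [List.count_cons, h1]
      · rw [ih2]; simp [List.count_cons, h1]; push_cast; ring
    · by_cases h2 : x = "SOP"
      · have hstep : pvBStep (tp, pend, s, e, segs) x = (tp ++ pend.toList, none, s + 1, e, segs) := by
          simp [pvBStep, h1, h2]
        rw [hstep]
        obtain ⟨ih1, ih2⟩ := ih (tp ++ pend.toList) none (s + 1) e segs
        refine ⟨?_, ?_⟩
        · rw [ih1]; simp [List.count_cons, h2]; push_cast; ring
        · rw [ih2]; simp [List.count_cons, h2, h1]
      · have hstep : pvBStep (tp, pend, s, e, segs) x = (tp ++ pend.toList, some x, s, e,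
            (PySem.List.pyRange e s 1).foldl (fun d i => d.modify i [] (fun seg => pvDD seg x)) segs) := by
          simp [pvBStep, h1, h2]
        rw [hstep]
        obtain ⟨ih1, ih2⟩ := ih (tp ++ pend.toList) (some x) s e
          ((PySem.List.pyRange e s 1).foldl (fun d i => d.modify i [] (fun seg => pvDD seg x)) segs)
        refine ⟨?_, ?_⟩
        · rw [ih1]; simp [List.count_cons, h2]
        · rw [ih2]; simp [List.count_cons, h1]

-- what B appends to segment i while the counters run from (s, e), as a recursion
def pvSel (s e : Int) (t : List String) (i : Int) : List String :=
  match t with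
  | [] => []
  | x :: t' => if x == "EOP" then pvSel s (e + 1) t' i
               else if x == "SOP" then pvSel (s + 1) e t' i
               else (if e ≤ i ∧ i < s then [x] else []) ++ pvSel s e t' i

-- the dict fold over range(e, s) touches segment i exactly when e ≤ i < s
theorem pvDict_range (x : String) (i : Int) : ∀ (n : Nat) (e s : Int), (s - e).toNat = n →
    ∀ (d : PySem.Dict Int (List String)),
    (((PySem.List.pyRange e s 1).foldl (fun d k => d.modify k [] (fun seg => pvDD seg x)) d).getD i [])
      = if e ≤ i ∧ i < s then pvDD (d.getD i []) x else d.getD i [] := by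
  intro n
  induction n with
  | zero =>
    intro e s h d
    rw [PySem.List.pyRange_one_eq_nil (by omega)]
    rw [if_neg (by omega)]
    rfl
  | succ n ih =>
    intro e s h d
    rw [PySem.List.pyRange_one_cons (by omega)]
    rw [List.foldl_cons, ih (e + 1) s (by omega)]
    by_cases hie : i = e
    · subst hie
      rw [if_neg (by omega), if_pos (by omega), PySem.Dict.getD_modify, if_pos rfl]
    · rw [PySem.Dict.getD_modify, if_neg hie]
      by_cases hc : e + 1 ≤ i ∧ i < s
      · rw [if_pos hc, if_pos (by omega)]
      · rw [if_neg hc, if_neg (by omega)]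

theorem pvB_segs (t : List String) : ∀ (tp : List String) (pend : Option String) (s e : Int)
    (segs : PySem.Dict Int (List String)) (i : Int),
    ((t.foldl pvBStep (tp, pend, s, e, segs)).2.2.2.2).getD i []
      = (pvSel s e t i).foldl pvDD (segs.getD i []) := by
  intro tp pend s e segs i
  induction t generalizing tp pend s e segs with
  | nil => simp [pvSel]
  | cons x t' ih =>
    rw [show ((x :: t').foldl pvBStep (tp, pend, s, e, segs)
        = t'.foldl pvBStep (pvBStep (tp, pend, s, e, segs) x)) from List.foldl_cons ..]
    by_cases h1 : x = "EOP"
    · have hstep : pvBStep (tp, pend, s, e, segs) x = (tp, none, s, e + 1, segs) := by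
        simp [pvBStep, h1]
      rw [hstep, ih]
      simp [pvSel, h1]
    · by_cases h2 : x = "SOP"
      · have hstep : pvBStep (tp, pend, s, e, segs) x = (tp ++ pend.toList, none, s + 1, e, segs) := by
          simp [pvBStep, h1, h2]
        rw [hstep, ih]
        simp [pvSel, h1, h2]
      · have hstep : pvBStep (tp, pend, s, e, segs) x = (tp ++ pend.toList, some x, s, e,
            (PySem.List.pyRange e s 1).foldl (fun d i => d.modify i [] (fun seg => pvDD seg x)) segs) := by
          simp [pvBStep, h1, h2]
        rw [hstep, ih]
        rw [pvDict_range x i (s - e).toNat e s rfl segs]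
        have hsel : pvSel s e (x :: t') i
            = (if e ≤ i ∧ i < s then [x] else []) ++ pvSel s e t' i := by
          simp [pvSel, h1, h2]
        rw [hsel, List.foldl_append]
        by_cases hc : e ≤ i ∧ i < s
        · rw [if_pos hc, if_pos hc]
          rfl
        · rw [if_neg hc, if_neg hc]
          rfl

theorem pvSel_N (t : List String) : ∀ (s0 e0 : Nat) (i : Int),
    pvSel (s0 : Int) (e0 : Int) t i
      = pvN t (fun m => pvNM (t.getD m "") &&
          decide (((e0 + pvCnt "EOP" t m : Nat) : Int) ≤ i) &&
          decide (i < ((s0 + pvCnt "SOP" t m : Nat) : Int))) := by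
  induction t with
  | nil => intro s0 e0 i; simp [pvSel, pvN]
  | cons x t' ih =>
    intro s0 e0 i
    rw [pvN_cons]
    have htail : pvN t' (fun m => pvNM ((x :: t').getD (m + 1) "") &&
          decide (((e0 + pvCnt "EOP" (x :: t') (m + 1) : Nat) : Int) ≤ i) &&
          decide (i < ((s0 + pvCnt "SOP" (x :: t') (m + 1) : Nat) : Int)))
        = pvN t' (fun m => pvNM (t'.getD m "") &&
          decide ((((if x == "EOP" then e0 + 1 else e0) + pvCnt "EOP" t' m : Nat) : Int) ≤ i) &&
          decide (i < (((if x == "SOP" then s0 + 1 else s0) + pvCnt "SOP" t' m : Nat) : Int))) := by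
      apply pvN_congr
      intro m hm
      rw [pvCnt_cons, pvCnt_cons, List.getD_cons_succ]
      by_cases h1 : x = "EOP" <;> by_cases h2 : x = "SOP" <;>
        simp [h1, h2] <;> ring_nf
    rw [htail]
    by_cases h1 : x = "EOP"
    · have : pvSel (s0 : Int) (e0 : Int) (x :: t') i = pvSel (s0 : Int) ((e0 : Int) + 1) t' i := by
        simp [pvSel, h1]
      rw [this]
      have hc : ((e0 : Int) + 1) = (((e0 + 1 : Nat)) : Int) := by push_cast; ring
      rw [hc, ih]
      simp [h1, pvNM]
    · by_cases h2 : x = "SOP"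
      · have : pvSel (s0 : Int) (e0 : Int) (x :: t') i = pvSel ((s0 : Int) + 1) (e0 : Int) t' i := by
          simp [pvSel, h1, h2]
        rw [this]
        have hc : ((s0 : Int) + 1) = (((s0 + 1 : Nat)) : Int) := by push_cast; ring
        rw [hc, ih]
        simp [h1, h2, pvNM]
      · have hstep : pvSel (s0 : Int) (e0 : Int) (x :: t') i
            = (if (e0 : Int) ≤ i ∧ i < (s0 : Int) then [x] else []) ++ pvSel (s0 : Int) (e0 : Int) t' i := by
          simp [pvSel, h1, h2]
        rw [hstep, ih]
        have hhead : (pvNM ((x :: t').getD 0 "") &&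
            decide (((e0 + pvCnt "EOP" (x :: t') 0 : Nat) : Int) ≤ i) &&
            decide (i < ((s0 + pvCnt "SOP" (x :: t') 0 : Nat) : Int)))
            = decide ((e0 : Int) ≤ i ∧ i < (s0 : Int)) := by
          by_cases hc : (e0 : Int) ≤ i ∧ i < (s0 : Int)
          · simp [pvNM, h1, h2, pvCnt_zero, hc, hc.1, hc.2]
          · rw [decide_eq_false hc]
            rcases not_and_or.mp hc with hcl | hcl <;> simp [pvNM, h1, h2, pvCnt_zero, hcl]
        rw [hhead]
        congr 1
        · by_cases hc : (e0 : Int) ≤ i ∧ i < (s0 : Int) <;> simp [hc]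
        · apply pvN_congr
          intro m hm
          simp [h1, h2]

-- selection for segment i = the marker-filtered slice between the i-th SOP and the i-th EOP
theorem pvSel_slice (p : List String) (iN : Nat)
    (hiE : iN < (pvPos "EOP" p).length) (hle : (pvPos "EOP" p).length ≤ (pvPos "SOP" p).length) :
    pvSel 0 0 p (iN : Int)
      = (PySem.List.slice p (some ((((pvPos "SOP" p)[iN]'(lt_of_lt_of_le hiE hle) + 1 : Nat) : Int)))
          (some (((pvPos "EOP" p)[iN] : Nat) : Int))).filter pvNM := by
  have hiS : iN < (pvPos "SOP" p).length := lt_of_lt_of_le hiE hle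
  rw [pv_slice_N, pvN_filter]
  have hsel := pvSel_N p 0 0 (iN : Int)
  simp only [Nat.cast_zero, Nat.zero_add] at hsel
  rw [hsel]
  apply pvN_congr
  intro m hm
  by_cases hnm : pvNM (p.getD m "") = true
  · have hm' : m ≤ p.length := le_of_lt hm
    have hcE : pvCnt "EOP" p m = ((pvPos "EOP" p).filter (fun q => q < m)).length := by
      rw [pvPos_filter_lt "EOP" p m hm']; rfl
    have hcS : pvCnt "SOP" p m = ((pvPos "SOP" p).filter (fun q => q < m)).length := by
      rw [pvPos_filter_lt "SOP" p m hm']; rfl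
    have hE := pv_nth_lt_iff (pvPos_pairwise "EOP" p) hiE m
    have hS := pv_nth_lt_iff (pvPos_pairwise "SOP" p) hiS m
    have hbval := (pvPos_getElem_val "EOP" p hiE).2
    have hmb : m ≠ (pvPos "EOP" p)[iN] := by
      intro hEqm
      have hge : p.getD m "" = "EOP" := by rw [hEqm]; exact hbval
      rw [hge] at hnm
      simp [pvNM] at hnm
    rw [Bool.eq_iff_iff]
    simp only [hnm, Bool.and_eq_true, Bool.and_true, true_and, decide_eq_true_eq]
    rw [hcE, hcS]
    constructor
    · rintro ⟨h1, h2⟩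
      have h1' : ((pvPos "EOP" p).filter (fun q => q < m)).length ≤ iN := by exact_mod_cast h1
      have h2' : iN < ((pvPos "SOP" p).filter (fun q => q < m)).length := by exact_mod_cast h2
      have hSm : (pvPos "SOP" p)[iN] < m := hS.2 h2'
      have hEm : ¬ ((pvPos "EOP" p)[iN] < m) := fun hlt => absurd (hE.1 hlt) (by omega)
      omega
    · rintro ⟨h1, h2⟩
      have hSm : (pvPos "SOP" p)[iN] < m := by omega
      have hEm : ¬ (iN < ((pvPos "EOP" p).filter (fun q => q < m)).length) :=
        fun hlt => absurd (hE.2 hlt) (by omega)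
      have hfS : iN < ((pvPos "SOP" p).filter (fun q => q < m)).length := hS.1 hSm
      constructor
      · exact_mod_cast by omega
      · exact_mod_cast hfS
  · have hnm' : pvNM (p.getD m "") = false := eq_false_of_ne_true hnm
    have hg : p.getD m "" = p[m]?.getD "" := rfl
    rw [hg] at hnm'
    simp [hnm']

-- the dedup accumulator as plain recursion, to relate the two loops
def pvDdrec (prev : String) (t : List String) (r : List String) : List String :=
  match t with
  | [] => r
  | x :: t' => pvDdrec x t' (if x != prev then r ++ [x] else r)

-- A's index dedup loop over the suffix after position pre.length equals pvDdrec
theorem pv_dedupA_loop (t : List String) : ∀ (pre : List String) (prev : String) (r : List String),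
    (PySem.List.pyRange ((pre.length : Int) + 1) (PySem.List.len (pre ++ prev :: t)) 1).foldl
      (fun result i =>
        if PySem.List.pyGetD (pre ++ prev :: t) i "" != PySem.List.pyGetD (pre ++ prev :: t) (i - 1) "" then
          result ++ [PySem.List.pyGetD (pre ++ prev :: t) i ""] else result) r
    = pvDdrec prev t r := by
  induction t with
  | nil =>
    intro pre prev r
    rw [PySem.List.pyRange_one_eq_nil (by simp)]
    rfl
  | cons x t' ih =>
    intro pre prev r
    rw [PySem.List.pyRange_one_cons (by simp)]
    rw [List.foldl_cons]
    have h1 : PySem.List.pyGetD (pre ++ prev :: x :: t') ((pre.length : Int) + 1) "" = x := by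
      have : ((pre.length : Int) + 1) = ((pre.length + 1 : Nat) : Int) := by push_cast; ring
      rw [this, PySem.List.pyGetD_natCast]
      simp [List.getD]
    have h2 : PySem.List.pyGetD (pre ++ prev :: x :: t') ((pre.length : Int) + 1 - 1) "" = prev := by
      have : ((pre.length : Int) + 1 - 1) = ((pre.length : Nat) : Int) := by ring
      rw [this, PySem.List.pyGetD_natCast]
      simp [List.getD]
    rw [h1, h2]
    have hl : pre ++ prev :: x :: t' = (pre ++ [prev]) ++ x :: t' := by simp
    have hstart : (pre.length : Int) + 1 + 1 = (((pre ++ [prev]).length : Nat) : Int) + 1 := by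
      simp
    rw [hl, hstart, ih (pre ++ [prev]) x _]
    rfl

-- B's accumulator dedup step equals pvDdrec once the accumulator is nonempty
theorem pv_dedupB_loop (t : List String) : ∀ (prev : String) (r : List String),
    r.getLast? = some prev →
    t.foldl pvDD r = pvDdrec prev t r := by
  induction t with
  | nil => intro prev r _; rfl
  | cons x t' ih =>
    intro prev r hr
    have hne : r.isEmpty = false := by
      cases r with
      | nil => simp at hr
      | cons a s => rfl
    rw [List.foldl_cons]
    by_cases hx : x = prev
    · subst hx
      have hstep : pvDD r x = r := by
        simp [pvDD, hne, hr]
      rw [hstep, ih x r hr]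
      simp [pvDdrec]
    · have hstep : pvDD r x = r ++ [x] := by
        simp [pvDD, hne, hr]
        exact fun h => hx h.symm
      rw [hstep, ih x (r ++ [x]) (by simp)]
      have hx' : ¬ prev = x := fun h => hx h.symm
      simp [pvDdrec]
      rw [if_neg hx]

-- A's head-seeded index dedup loop on a nonempty list is the pvDD fold
theorem pvA_dedup (fl : List String) (h : fl ≠ []) :
    (PySem.List.pyRange 1 (PySem.List.len fl) 1).foldl
      (fun result i =>
        if PySem.List.pyGetD fl i "" != PySem.List.pyGetD fl (i - 1) "" then
          result ++ [PySem.List.pyGetD fl i ""] else result)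
      [PySem.List.pyGetD fl 0 ""]
    = fl.foldl pvDD [] := by
  cases fl with
  | nil => exact absurd rfl h
  | cons hd tl =>
    have hA := pv_dedupA_loop tl [] hd [PySem.List.pyGetD (hd :: tl) 0 ""]
    simp only [List.nil_append, List.length_nil, Nat.cast_zero, zero_add] at hA
    rw [hA]
    rw [List.foldl_cons]
    have hfirst : pvDD [] hd = [hd] := by simp [pvDD]
    rw [hfirst, pv_dedupB_loop tl hd [hd] (by simp)]
    simp [PySem.List.pyGetD_zero_cons]

-- ---- assembly ----

theorem pv_main (p : List String) (hpre : Pre_PathTransferPassenger p) :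
    PathTransferPassenger p = PathTransferPassenger_alt p := by
  obtain ⟨hlen, hseg⟩ := hpre
  have hmapS : pvSops p = pvToInt (pvPos "SOP" p) := pv_enum_pos "SOP" p
  have hmapE : pvEops p = pvToInt (pvPos "EOP" p) := pv_enum_pos "EOP" p
  have hlen' : (pvPos "EOP" p).length ≤ (pvPos "SOP" p).length := by
    rw [hmapS, hmapE, pvToInt_length, pvToInt_length] at hlen
    exact hlen
  have hBtrans := pvB_transfer p [] none 0 0 PySem.Dict.empty
  have hBcnt := (pvB_counters p [] none 0 0 PySem.Dict.empty).2
  have hBsegs := pvB_segs p [] none 0 0 PySem.Dict.empty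
  unfold PathTransferPassenger PathTransferPassenger_alt
  simp only [PySem.List.foldl_append_singleton_eq_map, List.nil_append]
  refine Prod.ext ?_ ?_
  · simp only
    rw [pvA_transfer_N, ← pvG_none_N, hBtrans]
    simp
  · simp only [List.map_map]
    have hEdef : ((PySem.List.enumerate p).filter (fun q => q.2 == "EOP")).map (·.1) = pvEops p := rfl
    have hSdef : ((PySem.List.enumerate p).filter (fun q => q.2 == "SOP")).map (·.1) = pvSops p := rfl
    rw [hEdef, hSdef, hmapE, hmapS, hBcnt]
    apply List.ext_getElem
    · simp [PySem.List.length_pyRange_one, PySem.List.len_eq, pvToInt_length,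
        pvPos_length "EOP" p]
    · intro j h1 h2
      have hjE : j < (pvPos "EOP" p).length := by
        simpa [PySem.List.length_pyRange_one, PySem.List.len_eq, pvToInt_length] using h1
      have hjS : j < (pvPos "SOP" p).length := lt_of_lt_of_le hjE hlen'
      simp only [List.getElem_map, PySem.List.getElem_pyRange_one, Function.comp_apply]
      have hgE : PySem.List.pyGetD (pvToInt (pvPos "EOP" p)) (0 + (j : Int)) 0
          = ((pvPos "EOP" p)[j] : Int) := by
        rw [zero_add, PySem.List.pyGetD_natCast]
        exact pvToInt_getD _ j hjE
      have hgS : PySem.List.pyGetD (pvToInt (pvPos "SOP" p)) (0 + (j : Int)) 0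
          = ((pvPos "SOP" p)[j] : Int) := by
        rw [zero_add, PySem.List.pyGetD_natCast]
        exact pvToInt_getD _ j hjS
      rw [hgE, hgS]
      -- the slice between the j-th SOP and the j-th EOP, marker-filtered
      have hcast : ((pvPos "SOP" p)[j] : Int) + 1 = (((pvPos "SOP" p)[j] + 1 : Nat) : Int) := by
        push_cast; ring
      rw [hcast]
      have hfl : (PySem.List.slice p (some (((pvPos "SOP" p)[j] + 1 : Nat) : Int))
            (some (((pvPos "EOP" p)[j] : Nat) : Int))).filter
            (fun elem => elem != "SOP" && elem != "EOP")
          = (PySem.List.slice p (some (((pvPos "SOP" p)[j] + 1 : Nat) : Int))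
            (some (((pvPos "EOP" p)[j] : Nat) : Int))).filter pvNM := rfl
      rw [hfl]
      -- nonemptiness of the filtered segment, from Pre_
      have hne : (PySem.List.slice p (some (((pvPos "SOP" p)[j] + 1 : Nat) : Int))
            (some (((pvPos "EOP" p)[j] : Nat) : Int))).filter pvNM ≠ [] := by
        obtain ⟨x, hx, hx1, hx2⟩ := hseg j (List.mem_range.mpr (by rw [hmapE, pvToInt_length]; exact hjE))
        rw [hmapE, hmapS] at hx
        rw [pvToInt_getD _ j hjE, pvToInt_getD _ j hjS, hcast] at hx
        intro hnil
        rw [List.filter_eq_nil_iff] at hnil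
        have := hnil x hx
        simp [pvNM, hx1, hx2] at this
      rw [pvA_dedup _ hne]
      -- B's entry
      rw [hBsegs (0 + (j : Int))]
      rw [PySem.Dict.getD_empty]
      have hj0 : (0 : Int) + (j : Int) = ((j : Nat) : Int) := by ring
      rw [hj0]
      rw [pvSel_slice p j hjE hlen']

-- ===== VERDICT (by name: the statement is the Claim_ definition above) =====
theorem PathTransferPassenger_spec : Claim_equal_PathTransferPassenger := by
  intro p _ hpre
  unfold Spec_PathTransferPassenger
  exact pv_main p hpre
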